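-- pv_equiv track=rewrite | github.com/tlim8772/Leetcode | solved/lc3538.py | minTravelTime
-- ===== SOURCE A (Python) =====
-- from typing import List
--
-- from functools import cache
--
-- def minTravelTime(l: int, n: int, k: int, position: List[int], time: List[int]) -> int:
--     '''
--     start means (start, start + 1) is the 1st interval
--     offset is the additional cost due to previous mergers
--     kLeft is how many merges left
--
--     if we merge i intervals, new start interval is (s + i + 1, s + i + 2)
--     add cost of (s + 1, s + 2) (s + 2, s + 3) ... (s + i, s + i + 1)
--
--     '''
--     @cache
--     def dp(offset: int, start: int, kLeft: int) -> int:
--         if start == n - 1: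
--             return 999999999 if kLeft != 0 else 0
--
--         sum = 0
--         best = 999999999
--         for i in range(0, kLeft + 1):
--             if start + i + 1 > n - 1:
--                 break
--
--             res = (offset + time[start]) * (position[start + i + 1] - position[start]) + dp(sum, start + i + 1, kLeft - i)
--             best = min(best, res)
--
--             sum += time[start + i + 1]
--
--         return best
--
--     return dp(0, 0, k)
-- ===== SOURCE B (Python) =====
-- def minTravelTime(l, n, k, position, time):
--     INF = 999999999
--     if n == 1:
--         return 0 if k == 0 else INF
--     if n < 2 or k < 0:
--         return INF
--     # prefix[j] = time[0] + ... + time[j-1]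
--     prefix = [0]
--     acc = 0
--     for t in time[:n]:
--         acc = acc + t
--         prefix.append(acc)
--
--     def best(layers, offset, start, kl):
--         b = INF
--         for i in range(kl + 1):
--             nxt = start + i + 1
--             if nxt > n - 1:
--                 break
--             cost = (offset + time[start]) * (position[nxt] - position[start]) \
--                    + layers[i][i][k - (kl - i)]
--             if cost < b:
--                 b = cost
--         return b
--
--     # layers[j] = table for start = current + j; entry [m][d] is the optimal
--     # remaining cost when m previous intervals were merged into this start
--     # (offset = prefix[start] - prefix[start-m]) and d = k - kLeft merges used.
--     layers = [[[0 if k == d else INF for d in range(min(n - 1, k) + 1)]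
--                for m in range(n)]]
--     for start in range(n - 2, -1, -1):
--         layer = [[best(layers, prefix[start] - prefix[start - m], start, k - d)
--                   for d in range(min(start, k) + 1)]
--                  for m in range(start + 1)]
--         layers = [layer] + layers
--     return layers[0][0][0]
-- ===== Notes on version B (the rewrite author's own statement) =====
-- stated objective: alternative
-- what changed: Replaced the @cache top-down recursion dp(offset,start,kLeft) by an iterative bottom-up layered table indexed by (start, count m of intervals already merged into start, count d of merges already used), with prefix sums of `time` reconstructing the offset; transitions and the 999999999 sentinel arithmetic are identical, so the return value is exactly A's.
import Mathlib
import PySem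

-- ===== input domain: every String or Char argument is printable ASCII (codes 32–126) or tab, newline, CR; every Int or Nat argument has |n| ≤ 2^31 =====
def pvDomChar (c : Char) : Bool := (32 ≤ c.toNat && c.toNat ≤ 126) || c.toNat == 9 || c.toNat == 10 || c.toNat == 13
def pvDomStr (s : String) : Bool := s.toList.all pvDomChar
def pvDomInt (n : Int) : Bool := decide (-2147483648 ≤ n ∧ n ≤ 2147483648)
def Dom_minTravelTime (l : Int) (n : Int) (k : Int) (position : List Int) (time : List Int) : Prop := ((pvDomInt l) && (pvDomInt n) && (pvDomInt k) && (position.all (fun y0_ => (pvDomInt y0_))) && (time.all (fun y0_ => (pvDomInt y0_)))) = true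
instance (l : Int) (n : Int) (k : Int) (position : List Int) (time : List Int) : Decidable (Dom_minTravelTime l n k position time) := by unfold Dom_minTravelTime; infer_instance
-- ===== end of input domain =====

-- B replaces A's @cache top-down recursion by a bottom-up layered table indexed by
-- (start, count m of intervals merged into start, count d of merges already used),
-- with prefix sums of `time` reconstructing the merge offset; return values are identical.

-- ===== PORT A =====
-- xs[i] under Pre_ (index always in range there); total form for the port
def getI (xs : List Int) (i : Int) : Int := (PySem.List.pyGet? xs i).getD 0

/-- the `for i in range(0, kLeft + 1)` loop of A: `fuel` iterations remain, `i` is the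
    loop variable, `sum`/`best` the accumulators, the `break` is the early return;
    `dp` is the recursive call (one unit of termination gas lower, see `dpA`) -/
def loopA (n : Int) (position time : List Int) (dp : Int → Int → Int → Int)
    (offset start kLeft : Int) (i : Nat) (sum best : Int) (fuel : Nat) : Int :=
  match fuel with
  | 0 => best
  | fuel' + 1 =>
    if start + (i : Int) + 1 > n - 1 then best
    else
      -- res inlined into `min`
      loopA n position time dp offset start kLeft (i + 1)
        (sum + getI time (start + (i : Int) + 1))
        (min best ((offset + getI time start) * (getI position (start + (i : Int) + 1) - getI position start)
                   + dp sum (start + (i : Int) + 1) (kLeft - (i : Int)))) fuel'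

/-- the memoized `dp(offset, start, kLeft)` of A (memoization does not change the value);
    `gas` is pure termination fuel: every recursive call strictly increases `start`
    toward `n - 1`, so the top-level gas `(n - 1).toNat + 1` is never exhausted -/
def dpA (n : Int) (position time : List Int) (gas : Nat) (offset start kLeft : Int) : Int :=
  match gas with
  | 0 => 999999999
  | g + 1 =>
    if start = n - 1 then (if kLeft ≠ 0 then 999999999 else 0)
    else loopA n position time (dpA n position time g) offset start kLeft 0 0 999999999 (kLeft + 1).toNat

def minTravelTime (l : Int) (n : Int) (k : Int) (position : List Int) (time : List Int) : Int :=
  dpA n position time ((n - 1).toNat + 1) 0 0 k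

-- ===== PORT B =====
-- `if cost < b then cost else b`
def pvMinIf (cost b : Int) : Int := if cost < b then cost else b

-- layers[j][m][d] (three getD's; indices are in range wherever B reads)
def get3 (layers : List (List (List Int))) (j m d : Nat) : Int :=
  ((layers.getD j []).getD m []).getD d 0

/-- the `for i in range(kl + 1)` loop of B's `best` -/
def loopB (n : Int) (position time : List Int) (k : Int) (layers : List (List (List Int)))
    (offset start kl : Int) (i : Nat) (b : Int) (fuel : Nat) : Int :=
  match fuel with
  | 0 => b
  | fuel' + 1 =>
    if start + (i : Int) + 1 > n - 1 then b
    else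
      -- cost inlined into the conditional update of b
      loopB n position time k layers offset start kl (i + 1)
        (pvMinIf ((offset + getI time start) * (getI position (start + (i : Int) + 1) - getI position start)
                  + get3 layers i i (k - (kl - (i : Int))).toNat) b) fuel'

/-- B's `best(layers, offset, start, kl)` -/
def bestB (n : Int) (position time : List Int) (k : Int) (layers : List (List (List Int)))
    (offset start kl : Int) : Int :=
  loopB n position time k layers offset start kl 0 999999999 (kl + 1).toNat

/-- base table for start = n-1 -/
def baseB (n k : Int) : List (List Int) :=
  (List.range n.toNat).map (fun _ =>
    (List.range ((min (n - 1) k).toNat + 1)).map (fun d : Nat => if k = (d : Int) then 0 else 999999999))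

/-- table for a given start `s`, computed from the layers of all larger starts -/
def layerB (n : Int) (position time : List Int) (k : Int) (layers : List (List (List Int)))
    (prefixL : List Int) (s : Nat) : List (List Int) :=
  (List.range (s + 1)).map (fun m : Nat =>
    (List.range ((min (s : Int) k).toNat + 1)).map (fun d : Nat =>
      bestB n position time k layers (getI prefixL (s : Int) - getI prefixL ((s : Int) - (m : Int))) (s : Int) (k - (d : Int))))

/-- the `for start in range(n-2, -1, -1)` loop prepending one layer per start -/
def buildB (n : Int) (position time : List Int) (k : Int) (prefixL : List Int) : List (List (List Int)) :=
  ((List.range (n - 1).toNat).reverse).foldl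
    (fun layers s => layerB n position time k layers prefixL s :: layers)
    [baseB n k]

/-- prefix sums of time[:n], built exactly as B's append loop -/
def prefixB (time : List Int) (n : Int) : List Int :=
  ((PySem.List.slice time none (some n)).foldl
    (fun (p : List Int × Int) t => (p.1 ++ [p.2 + t], p.2 + t)) ([0], 0)).1

def minTravelTime_alt (l : Int) (n : Int) (k : Int) (position : List Int) (time : List Int) : Int :=
  if n = 1 then (if k = 0 then 0 else 999999999)
  else if n < 2 ∨ k < 0 then 999999999
  else get3 (buildB n position time k (prefixB time n)) 0 0 0

-- ===== PRECONDITION & SPEC =====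
-- Pre_ excludes exactly the inputs on which A raises IndexError: with n ≥ 2 and k ≥ 0,
-- A reads position[0..n-1] and time[0..n-1], so both lists must have length ≥ n.
def Pre_minTravelTime (l : Int) (n : Int) (k : Int) (position : List Int) (time : List Int) : Prop :=
  n ≤ 1 ∨ k < 0 ∨ (n ≤ (position.length : Int) ∧ n ≤ (time.length : Int))
instance (l : Int) (n : Int) (k : Int) (position : List Int) (time : List Int) : Decidable (Pre_minTravelTime l n k position time) := by unfold Pre_minTravelTime; infer_instance
def pvWitness_minTravelTime : Int × Int × Int × List Int × List Int := (10, 3, 1, [0, 5, 10], [1, 2, 3])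

def Spec_minTravelTime (l : Int) (n : Int) (k : Int) (position : List Int) (time : List Int) (out : Int) : Prop := out = minTravelTime_alt l n k position time
instance (l : Int) (n : Int) (k : Int) (position : List Int) (time : List Int) (out : Int) : Decidable (Spec_minTravelTime l n k position time out) := by unfold Spec_minTravelTime; infer_instance

-- ===== CLAIM (what is proved, stated in full; the proofs are below) =====
def Claim_equal_minTravelTime : Prop := ∀ (l : Int) (n : Int) (k : Int) (position : List Int) (time : List Int), Dom_minTravelTime l n k position time → Pre_minTravelTime l n k position time → Spec_minTravelTime l n k position time (minTravelTime l n k position time)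

-- ===== LEMMAS AND PROOFS =====

/-- prefix-sum value: sum of the first j entries of time -/
def pvT (time : List Int) (j : Nat) : Int := (time.take j).sum

/-- correctness of the layered table: after the build has reached start `s`,
    layer `j` holds the dp values for start `s+j` -/
def Good4 (n : Int) (position time : List Int) (k : Int)
    (layers : List (List (List Int))) (s : Nat) : Prop :=
  ∀ j m d : Nat, ((s + j : Nat) : Int) ≤ n - 1 → m ≤ s + j → (d : Int) ≤ min ((s + j : Nat) : Int) k →
    get3 layers j m d
      = dpA n position time ((n - 1).toNat + 1) (pvT time (s + j) - pvT time (s + j - m)) ((s + j : Nat) : Int) (k - (d : Int))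

theorem loopA_congr (n : Int) (position time : List Int) (dp1 dp2 : Int → Int → Int → Int)
    (offset start kLeft : Int)
    (h : ∀ (off kl' : Int) (j : Nat), start + (j : Int) + 1 ≤ n - 1 →
      dp1 off (start + (j : Int) + 1) kl' = dp2 off (start + (j : Int) + 1) kl') :
    ∀ (fuel i : Nat) (sum best : Int),
      loopA n position time dp1 offset start kLeft i sum best fuel
        = loopA n position time dp2 offset start kLeft i sum best fuel := by
  intro fuel
  induction fuel with
  | zero => intro i sum best; rfl
  | succ fuel ih =>
    intro i sum best
    rw [loopA, loopA]
    by_cases hguard : start + (i : Int) + 1 > n - 1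
    · rw [if_pos hguard, if_pos hguard]
    · rw [if_neg hguard, if_neg hguard, h _ _ _ (by omega)]
      exact ih _ _ _

theorem dpA_irrel (n : Int) (position time : List Int) :
    ∀ (g g' : Nat) (offset start kLeft : Int), (n - 1 - start).toNat < g →
      (n - 1 - start).toNat < g' →
      dpA n position time g offset start kLeft = dpA n position time g' offset start kLeft := by
  intro g
  induction g with
  | zero => intro g' offset start kLeft hg hg'; omega
  | succ g ih =>
    intro g' offset start kLeft hg hg'
    cases g' with
    | zero => omega
    | succ g' =>
      rw [dpA, dpA]
      by_cases hb : start = n - 1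
      · rw [if_pos hb, if_pos hb]
      · rw [if_neg hb, if_neg hb]
        apply loopA_congr
        intro off kl' j hj
        exact ih g' off (start + (j : Int) + 1) kl' (by omega) (by omega)

theorem getI_nat (xs : List Int) (j : Nat) (h : j < xs.length) : getI xs (j : Int) = xs[j] := by
  simp [getI, PySem.List.pyGet?_natCast, List.getElem?_eq_getElem h]

theorem pvT_succ (time : List Int) (j : Nat) (h : j < time.length) :
    pvT time (j + 1) = pvT time j + time[j] := by
  have := List.sum_take_succ (L := time) (i := j) h
  simpa [pvT] using this

theorem pref_fold (l : List Int) : ∀ (acc : List Int) (s : Int),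
    (l.foldl (fun (p : List Int × Int) t => (p.1 ++ [p.2 + t], p.2 + t)) (acc, s)).1
      = acc ++ (List.range l.length).map (fun j => s + (l.take (j + 1)).sum) := by
  induction l with
  | nil => simp
  | cons t l ih =>
    intro acc s
    simp only [List.foldl_cons, List.length_cons, List.range_succ_eq_map, List.map_cons,
      List.map_map]
    rw [ih]
    simp [List.take_succ_cons, Function.comp_def, add_assoc]

theorem prefixB_spec (time : List Int) (n : Int) (hn : 0 ≤ n) (hlen : n.toNat ≤ time.length) :
    prefixB time n = (List.range (n.toNat + 1)).map (pvT time) := by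
  unfold prefixB
  rw [PySem.List.slice_to time hn, pref_fold]
  rw [List.range_succ_eq_map, List.map_cons]
  simp only [List.map_map, List.length_take, min_eq_left hlen]
  refine List.cons_eq_cons.mpr ⟨by simp [pvT], ?_⟩
  apply List.map_congr_left
  intro j hj
  rw [List.mem_range] at hj
  simp only [Function.comp_def, pvT]
  rw [List.take_take, min_eq_left (by omega)]
  simp [Nat.succ_eq_add_one]

theorem pref_get (time : List Int) (n : Int) (hn : 0 ≤ n) (hlen : n.toNat ≤ time.length)
    (j : Nat) (hj : j ≤ n.toNat) :
    getI (prefixB time n) (j : Int) = pvT time j := by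
  rw [prefixB_spec time n hn hlen, getI_nat _ _ (by simp; omega)]
  simp

theorem base_good (n : Int) (position time : List Int) (k : Int) (h2 : 2 ≤ n) (hk : 0 ≤ k) :
    Good4 n position time k [baseB n k] (n.toNat - 1) := by
  intro j m d h1 h2' h3
  have hj : j = 0 := by omega
  subst hj
  have hstart : ((n.toNat - 1 + 0 : Nat) : Int) = n - 1 := by omega
  rw [dpA, if_pos hstart]
  simp only [get3, List.getD_cons_zero]
  rw [baseB]
  have hm : m < n.toNat := by omega
  rw [PySem.List.getD_map_range _ _ _ _ hm]
  have hd : d < (min (n - 1) k).toNat + 1 := by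
    simp only [hstart] at h3; omega
  rw [PySem.List.getD_map_range _ _ _ _ hd]
  by_cases hkd : k = (d : Int)
  · simp [hkd]
  · rw [if_neg hkd, if_pos (by omega)]

theorem loopAB (n : Int) (position time : List Int) (k : Int) (layers : List (List (List Int)))
    (s : Nat) (hGood : Good4 n position time k layers (s + 1))
    (h2 : 2 ≤ n) (hp : n ≤ (position.length : Int)) (ht : n ≤ (time.length : Int))
    (hk : 0 ≤ k) (hs : (s : Int) ≤ n - 2) (kl : Int) (hkl : 0 ≤ kl)
    (hklk : k - kl ≤ (s : Int)) (hklk0 : 0 ≤ k - kl) (g : Nat)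
    (hg : (n - 1 - (s : Int)).toNat ≤ g) :
    ∀ (fuel : Nat) (i : Nat) (sum b offset : Int), ((i : Int) + (fuel : Int) = kl + 1) →
      (sum = pvT time (s + 1 + i) - pvT time (s + 1)) →
      loopA n position time (dpA n position time g) offset (s : Int) kl i sum b fuel
        = loopB n position time k layers offset (s : Int) kl i b fuel := by
  intro fuel
  induction fuel with
  | zero => intro i sum b offset hfi hsum; simp [loopA, loopB]
  | succ fuel ih =>
    intro i sum b offset hfi hsum
    rw [loopA, loopB]
    by_cases hguard : (s : Int) + (i : Int) + 1 > n - 1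
    · rw [if_pos hguard, if_pos hguard]
    · rw [if_neg hguard, if_neg hguard]
      have hile : (i : Int) ≤ kl := by omega
      have hlt : s + i + 1 ≤ n - 1 := by push_cast at hguard ⊢; omega
      -- the table entry B reads is exactly the dp value A recurses into
      have hread := hGood i i ((k - (kl - (i : Int))).toNat)
        (by push_cast; omega) (by omega)
        (by push_cast; rw [Int.toNat_of_nonneg (by omega)]; omega)
      have hd : ((k - (kl - (i : Int))).toNat : Int) = k - kl + i := by
        rw [Int.toNat_of_nonneg (by omega)]; ring
      have hsub : s + 1 + i - i = s + 1 := by omega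
      rw [hsub] at hread
      have hcast : ((s + 1 + i : Nat) : Int) = (s : Int) + (i : Int) + 1 := by push_cast; omega
      rw [hcast, hd] at hread
      have hkd : k - (k - kl + (i : Int)) = kl - (i : Int) := by ring
      rw [hkd] at hread
      rw [← hsum] at hread
      have hirr : dpA n position time g sum ((s : Int) + (i : Int) + 1) (kl - (i : Int))
          = dpA n position time ((n - 1).toNat + 1) sum ((s : Int) + (i : Int) + 1) (kl - (i : Int)) :=
        dpA_irrel n position time g _ sum _ _ (by omega) (by omega)
      have hres : get3 layers i i (k - (kl - (i : Int))).toNat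
          = dpA n position time g sum ((s : Int) + (i : Int) + 1) (kl - (i : Int)) :=
        hread.trans hirr.symm
      have hbest : ∀ c : Int, min b c = pvMinIf c b := by
        intro c; by_cases h : c < b <;> simp [pvMinIf, min_def, h]
      rw [hres, hbest]
      -- recursive step
      have hidx : s + 1 + i < time.length := by omega
      have hsum' : sum + getI time ((s : Int) + (i : Int) + 1)
          = pvT time (s + 1 + (i + 1)) - pvT time (s + 1) := by
        have hg : getI time ((s : Int) + (i : Int) + 1) = time[s + 1 + i] := by
          rw [← hcast]; exact getI_nat time (s + 1 + i) hidx
        have hstep := pvT_succ time (s + 1 + i) hidx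
        have hE : s + 1 + i + 1 = s + 1 + (i + 1) := by omega
        rw [hE] at hstep
        rw [hg, hsum, hstep]; ring
      exact ih (i + 1) _ _ offset (by push_cast; push_cast at hfi; omega) hsum'

theorem dp_eq (n : Int) (position time : List Int) (k : Int) (layers : List (List (List Int)))
    (s : Nat) (hGood : Good4 n position time k layers (s + 1))
    (h2 : 2 ≤ n) (hp : n ≤ (position.length : Int)) (ht : n ≤ (time.length : Int))
    (hk : 0 ≤ k) (hs : (s : Int) ≤ n - 2) (kl : Int) (hkl : 0 ≤ kl)
    (hklk : k - kl ≤ (s : Int)) (hklk0 : 0 ≤ k - kl) (g : Nat)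
    (hgs : (n - 1 - (s : Int)).toNat < g) (offset : Int) :
    dpA n position time g offset (s : Int) kl = bestB n position time k layers offset (s : Int) kl := by
  cases g with
  | zero => omega
  | succ g =>
    rw [dpA, if_neg (by omega), bestB]
    exact loopAB n position time k layers s hGood h2 hp ht hk hs kl hkl hklk hklk0
      g (by omega) ((kl + 1).toNat) 0 0 999999999 offset
      (by rw [Int.toNat_of_nonneg (by omega)]; simp) (by simp)

theorem layer_good (n : Int) (position time : List Int) (k : Int) (layers : List (List (List Int)))
    (s : Nat) (hGood : Good4 n position time k layers (s + 1))
    (h2 : 2 ≤ n) (hp : n ≤ (position.length : Int)) (ht : n ≤ (time.length : Int))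
    (hk : 0 ≤ k) (hs : (s : Int) ≤ n - 2) :
    Good4 n position time k (layerB n position time k layers (prefixB time n) s :: layers) s := by
  intro j m d h1 h2' h3
  cases j with
  | zero =>
    simp only [get3, List.getD_cons_zero]
    rw [layerB]
    rw [PySem.List.getD_map_range _ _ _ _ (show m < s + 1 by omega)]
    have hd : d < (min (s : Int) k).toNat + 1 := by
      simp only [Nat.add_zero] at h3; omega
    rw [PySem.List.getD_map_range _ _ _ _ hd]
    have hsn : s ≤ n.toNat := by omega
    have hg1 : getI (prefixB time n) (s : Int) = pvT time s :=
      pref_get time n (by omega) (by omega) s (by omega)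
    have hcast : (s : Int) - (m : Int) = ((s - m : Nat) : Int) := by omega
    have hg2 : getI (prefixB time n) ((s : Int) - (m : Int)) = pvT time (s - m) := by
      rw [hcast]; exact pref_get time n (by omega) (by omega) (s - m) (by omega)
    rw [hg1, hg2]
    have hdk : (d : Int) ≤ k := by simp only [Nat.add_zero] at h3; omega
    have hds : (d : Int) ≤ (s : Int) := by simp only [Nat.add_zero] at h3; omega
    rw [← dp_eq n position time k layers s hGood h2 hp ht hk hs (k - (d : Int))
      (by omega) (by omega) (by omega) ((n - 1).toNat + 1) (by omega) _]
    simp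
  | succ j' =>
    have hE : s + (j' + 1) = (s + 1) + j' := by omega
    rw [hE]
    exact hGood j' m d (by omega) (by omega) (by rw [← hE]; exact h3)

theorem fold_good (n : Int) (position time : List Int) (k : Int)
    (h2 : 2 ≤ n) (hp : n ≤ (position.length : Int)) (ht : n ≤ (time.length : Int)) (hk : 0 ≤ k) :
    ∀ (c : Nat) (L : List (List (List Int))), Good4 n position time k L c → (c : Int) ≤ n - 1 →
      Good4 n position time k
        (((List.range c).reverse).foldl
          (fun layers s => layerB n position time k layers (prefixB time n) s :: layers) L) 0 := by
  intro c
  induction c with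
  | zero => intro L hL _; simpa using hL
  | succ c ih =>
    intro L hL hc
    rw [List.range_succ, List.reverse_append]
    simp only [List.reverse_singleton, List.singleton_append, List.foldl_cons]
    exact ih _ (layer_good n position time k L c hL h2 hp ht hk (by push_cast at hc ⊢; omega))
      (by push_cast at hc ⊢; omega)

-- ===== VERDICT (by name: the statement is the Claim_ definition above) =====
theorem minTravelTime_spec : Claim_equal_minTravelTime := by
  intro l n k position time hdom hpre
  unfold Spec_minTravelTime minTravelTime minTravelTime_alt
  by_cases hn1 : n = 1
  · subst hn1
    rw [dpA, if_pos (by omega)]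
    by_cases hk0 : k = 0 <;> simp [hk0]
  · rw [if_neg hn1]
    by_cases hn2 : n < 2
    · rw [if_pos (show n < 2 ∨ k < 0 from Or.inl hn2), dpA, if_neg (by omega)]
      cases hft : (k + 1).toNat with
      | zero => rw [loopA]
      | succ f => rw [loopA, if_pos (by push_cast; omega)]
    · by_cases hk : k < 0
      · rw [if_pos (show n < 2 ∨ k < 0 from Or.inr hk), dpA, if_neg (by omega)]
        have : (k + 1).toNat = 0 := by omega
        rw [this, loopA]
      · rw [if_neg (show ¬(n < 2 ∨ k < 0) by push_neg; exact ⟨by omega, by omega⟩)]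
        have h2 : 2 ≤ n := by omega
        have hk' : 0 ≤ k := by omega
        obtain hlen : n ≤ (position.length : Int) ∧ n ≤ (time.length : Int) := by
          rcases hpre with h | h | h
          · omega
          · omega
          · exact h
        have hbase := base_good n position time k h2 hk'
        have hNE : (n - 1).toNat = n.toNat - 1 := by omega
        have hfold := fold_good n position time k h2 hlen.1 hlen.2 hk' (n.toNat - 1)
          [baseB n k] hbase (by omega)
        unfold buildB
        rw [hNE]
        have := hfold 0 0 0 (by push_cast; omega) (by omega)
          (by push_cast; omega)
        simp only [Nat.add_zero, Nat.sub_zero, Nat.cast_zero] at this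
        rw [this]
        simp [pvT]
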